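-- pv_equiv track=rewrite | github.com/AnasJb0/Password | Password.py | NbCAlpha
-- ===== SOURCE A (Python) =====
-- def NbCAlpha(p):
--     a = 0
--     for i in range(len(p)):
--         if ord("A") <= ord(p[i]) <= ord("Z") or ord("a") <= ord(p[i]) <= ord("z"):
--             g = 0
--         else:
--             a += 1
--     return a
-- ===== SOURCE B (Python) =====
-- def NbCAlpha(p):
--     n = len(p)
--     if n == 0:
--         return 0
--     if n == 1:
--         return 0 if ('A' <= p <= 'Z' or 'a' <= p <= 'z') else 1
--     m = n // 2
--     return NbCAlpha(p[:m]) + NbCAlpha(p[m:])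
-- ===== Notes on version B (the rewrite author's own statement) =====
-- stated objective: alternative
-- what changed: B replaces A's single left-to-right counter loop with a divide-and-conquer recursion: a string of length >= 2 is split at the midpoint and the non-letter counts of the two halves are added, with the character test applied only in the length-1 base case.
import Mathlib
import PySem

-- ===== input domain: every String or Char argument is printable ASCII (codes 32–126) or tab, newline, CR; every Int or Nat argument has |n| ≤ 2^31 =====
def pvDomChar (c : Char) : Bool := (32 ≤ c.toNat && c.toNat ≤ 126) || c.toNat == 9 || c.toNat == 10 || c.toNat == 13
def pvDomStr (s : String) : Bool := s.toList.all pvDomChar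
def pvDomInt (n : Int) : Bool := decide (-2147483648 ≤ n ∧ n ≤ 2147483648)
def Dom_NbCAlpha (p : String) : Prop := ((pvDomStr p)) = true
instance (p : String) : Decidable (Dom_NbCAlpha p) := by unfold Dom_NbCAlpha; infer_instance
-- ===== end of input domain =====

-- B counts non-letters by divide-and-conquer on string halves instead of A's left-to-right counter loop (objective: alternative).


-- ===== PORT A =====
-- the ASCII-range letter test 'A' <= c <= 'Z' or 'a' <= c <= 'z' (shared by both Pythons)
def isLetter (c : Char) : Bool :=
  ('A'.toNat ≤ c.toNat && c.toNat ≤ 'Z'.toNat) || ('a'.toNat ≤ c.toNat && c.toNat ≤ 'z'.toNat)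

-- A: loop over the characters; if letter, do nothing (g = 0), else a += 1
def NbCAlpha (p : String) : Int :=
  p.toList.foldl (fun a c => if isLetter c then a else a + 1) 0

-- ===== PORT B =====
-- B: divide and conquer on the character list; halves split at length / 2
def nbGo (l : List Char) : Int :=
  match l with
  | [] => 0
  | [c] => if isLetter c then 0 else 1
  | c1 :: c2 :: rest =>
      nbGo ((c1 :: c2 :: rest).take ((c1 :: c2 :: rest).length / 2)) +
      nbGo ((c1 :: c2 :: rest).drop ((c1 :: c2 :: rest).length / 2))
termination_by l.length
decreasing_by
  · simp [List.length_take]; omega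
  · simp [List.length_drop]; omega

def NbCAlpha_alt (p : String) : Int := nbGo p.toList

-- ===== PRECONDITION & SPEC =====
def Spec_NbCAlpha (p : String) (out : Int) : Prop := out = NbCAlpha_alt p
instance (p : String) (out : Int) : Decidable (Spec_NbCAlpha p out) := by unfold Spec_NbCAlpha; infer_instance

-- ===== CLAIM (what is proved, stated in full; the proofs are below) =====
def Claim_equal_NbCAlpha : Prop := ∀ (p : String), Dom_NbCAlpha p → Spec_NbCAlpha p (NbCAlpha p)

-- ===== LEMMAS AND PROOFS =====
theorem foldA_eq (l : List Char) (a : Int) :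
    l.foldl (fun a c => if isLetter c then a else a + 1) a
      = a + ((l.countP (fun c => !isLetter c) : Nat) : Int) := by
  induction l generalizing a with
  | nil => simp
  | cons c t ih =>
    simp only [List.foldl_cons, List.countP_cons]
    by_cases h : isLetter c = true
    · rw [ih]; simp [h]
    · rw [ih]; simp [h]; ring

theorem nbGo_eq (l : List Char) :
    nbGo l = ((l.countP (fun c => !isLetter c) : Nat) : Int) := by
  induction l using nbGo.induct with
  | case1 => simp [nbGo]
  | case2 c h => simp [nbGo, h]
  | case3 c h => simp [nbGo, h]
  | case4 c1 c2 rest ih1 ih2 =>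
    rw [nbGo, ih1, ih2]
    rw [← Nat.cast_add, ← List.countP_append, List.take_append_drop]

-- ===== VERDICT (by name: the statement is the Claim_ definition above) =====
theorem NbCAlpha_spec : Claim_equal_NbCAlpha := by
  intro p _
  unfold Spec_NbCAlpha NbCAlpha NbCAlpha_alt
  rw [foldA_eq, nbGo_eq]; ring
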